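-- pv_equiv track=rewrite | github.com/squancy/aoc-solutions | 2022/15.py | hor
-- ===== SOURCE A (Python) =====
-- def mdis(p1, p2):
--   return abs(p1[0] - p2[0]) + abs(p1[1] - p2[1])
--
-- def hor(pairs, Y):
--   intervals = []
--   for pair in pairs:
--     S, B, r = pair[0], pair[1], pair[2]
--     if S[1] + r >= Y or S[1] - r <= Y:
--       i = r - mdis(S, [S[0], Y])
--       if i < 0: continue
--       intervals.append([S[0] - i, S[0] + i])
--
--   si = sorted(intervals)
--   flag = False
--   covered = si[0][1]
--   for i in range(1, len(si)):
--     if si[i][0] - 1 > covered: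
--       return True
--     elif si[i][1] > covered:
--       covered = si[i][1]
--   return False
-- ===== SOURCE B (Python) =====
-- def hor(pairs, Y):
--   ivs = []
--   for S, _, r in pairs:
--     k = r - abs(S[1] - Y)
--     if k >= 0:
--       ivs.append((S[0] - k, S[0] + k))
--   # A gap exists iff some interval starts at a point a whose predecessor a-1
--   # is covered by no interval, while some interval ends strictly before a.
--   return any(all(not (c <= a - 1 <= d) for c, d in ivs)
--              and any(d < a for _, d in ivs)
--              for a, _ in ivs)
-- ===== Notes on version B (the rewrite author's own statement) =====
-- stated objective: alternative
-- what changed: Replaces A's sort-then-sweep (sorted intervals, running 'covered' accumulator) by a direct pointwise test: a gap exists iff some interval's start a has a-1 covered by no interval while some interval ends strictly before a; no sorting and no mutable sweep state.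
-- crash fix: On inputs where no sensor's range reaches row Y (the interval list is empty) A raises IndexError on si[0][1]; B returns False. — e.g. on hor([((0, 5), (0, 0), 2)], 0): A raises IndexError, B returns false
import Mathlib
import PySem

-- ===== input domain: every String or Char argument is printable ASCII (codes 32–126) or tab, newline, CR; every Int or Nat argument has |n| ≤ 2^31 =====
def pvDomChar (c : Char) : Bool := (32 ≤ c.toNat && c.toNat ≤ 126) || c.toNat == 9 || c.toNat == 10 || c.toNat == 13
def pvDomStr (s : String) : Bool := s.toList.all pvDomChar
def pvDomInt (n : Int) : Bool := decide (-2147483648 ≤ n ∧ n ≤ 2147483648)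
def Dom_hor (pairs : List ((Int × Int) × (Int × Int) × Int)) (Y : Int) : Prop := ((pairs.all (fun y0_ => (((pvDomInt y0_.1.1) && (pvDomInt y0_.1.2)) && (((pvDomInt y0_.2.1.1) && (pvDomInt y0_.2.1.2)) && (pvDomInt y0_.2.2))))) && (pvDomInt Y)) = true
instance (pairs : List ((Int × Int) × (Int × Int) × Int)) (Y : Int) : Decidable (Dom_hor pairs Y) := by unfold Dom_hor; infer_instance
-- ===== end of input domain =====

-- B replaces A's sort-then-sweep by a points-based quadratic test (no sorting, no sweep state);
-- same return value wherever A returns; on the empty-interval inputs where A raises IndexError, B returns False.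

-- ===== PORT A =====
def hor_mdis (p1 p2 : Int × Int) : Int := |p1.1 - p2.1| + |p1.2 - p2.2|

-- the sweep loop 'for i in range(1, len(si))' over the tail of si, state 'covered'
def horLoop (covered : Int) (l : List (Int × Int)) : Bool :=
  match l with
  | [] => false
  | (a, b) :: t =>
    if a - 1 > covered then true
    else if b > covered then horLoop b t
    else horLoop covered t

def hor (pairs : List ((Int × Int) × (Int × Int) × Int)) (Y : Int) : Bool :=
  let intervals := pairs.foldl (fun acc pair =>
    let S := pair.1
    let r := pair.2.2
    if S.2 + r ≥ Y ∨ S.2 - r ≤ Y then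
      let i := r - hor_mdis S (S.1, Y)
      if i < 0 then acc else acc ++ [(S.1 - i, S.1 + i)]
    else acc) []
  let si := PySem.List.sorted2 intervals (fun p => p.1) (fun p => p.2)
  match si with
  | [] => false   -- Python raises IndexError on 'si[0][1]' here; excluded by Pre_hor
  | (_, b0) :: t => horLoop b0 t

-- ===== PORT B =====
def hor_alt (pairs : List ((Int × Int) × (Int × Int) × Int)) (Y : Int) : Bool :=
  let ivs := pairs.foldl (fun acc p =>
    let k := p.2.2 - |p.1.2 - Y|
    if 0 ≤ k then acc ++ [(p.1.1 - k, p.1.1 + k)] else acc) []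
  ivs.any (fun q =>
    ivs.all (fun e => !(decide (e.1 ≤ q.1 - 1) && decide (q.1 - 1 ≤ e.2))) &&
    ivs.any (fun e => decide (e.2 < q.1)))

-- ===== PRECONDITION & SPEC =====
-- Pre_hor excludes exactly the inputs where A raises IndexError (no sensor reaches row Y, so the
-- interval list is empty and 'si[0][1]' fails).
def Pre_hor (pairs : List ((Int × Int) × (Int × Int) × Int)) (Y : Int) : Prop :=
  (pairs.any (fun p => decide (0 ≤ p.2.2 - |p.1.2 - Y|))) = true
instance (pairs : List ((Int × Int) × (Int × Int) × Int)) (Y : Int) : Decidable (Pre_hor pairs Y) := by unfold Pre_hor; infer_instance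

def pvWitness_hor : (List ((Int × Int) × (Int × Int) × Int)) × Int := ([((0, 0), (1, 1), 2), ((9, 0), (9, 1), 1)], 0)

-- On inputs where no sensor's range reaches row Y (empty interval list) A raises IndexError; B returns False.
def Raises_hor (pairs : List ((Int × Int) × (Int × Int) × Int)) (Y : Int) : Prop :=
  (pairs.all (fun p => decide (p.2.2 - |p.1.2 - Y| < 0))) = true
instance (pairs : List ((Int × Int) × (Int × Int) × Int)) (Y : Int) : Decidable (Raises_hor pairs Y) := by unfold Raises_hor; infer_instance
def pvRaiseWitness_hor : (List ((Int × Int) × (Int × Int) × Int)) × Int := ([((0, 5), (0, 0), 2)], 0)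
def pvRaiseWitnessOut_hor : Bool := false

def Spec_hor (pairs : List ((Int × Int) × (Int × Int) × Int)) (Y : Int) (out : Bool) : Prop := out = hor_alt pairs Y
instance (pairs : List ((Int × Int) × (Int × Int) × Int)) (Y : Int) (out : Bool) : Decidable (Spec_hor pairs Y out) := by unfold Spec_hor; infer_instance

-- ===== CLAIM (what is proved, stated in full; the proofs are below) =====
def Claim_equal_hor : Prop := ∀ (pairs : List ((Int × Int) × (Int × Int) × Int)) (Y : Int), Dom_hor pairs Y → Pre_hor pairs Y → Spec_hor pairs Y (hor pairs Y)
def Claim_raises_hor : Prop := (∀ (pairs : List ((Int × Int) × (Int × Int) × Int)) (Y : Int), Dom_hor pairs Y → Raises_hor pairs Y → ¬ Pre_hor pairs Y) ∧ (Dom_hor (pvRaiseWitness_hor.1) (pvRaiseWitness_hor.2) ∧ Raises_hor (pvRaiseWitness_hor.1) (pvRaiseWitness_hor.2) ∧ hor_alt (pvRaiseWitness_hor.1) (pvRaiseWitness_hor.2) = pvRaiseWitnessOut_hor)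

-- ===== LEMMAS AND PROOFS =====

-- the radius of coverage of pair p on row Y, and its interval
def ivK (Y : Int) (p : (Int × Int) × (Int × Int) × Int) : Int := p.2.2 - |p.1.2 - Y|
def ivOf (Y : Int) (p : (Int × Int) × (Int × Int) × Int) : Int × Int :=
  (p.1.1 - ivK Y p, p.1.1 + ivK Y p)
def ivList (pairs : List ((Int × Int) × (Int × Int) × Int)) (Y : Int) : List (Int × Int) :=
  (pairs.filter (fun p => decide (0 ≤ ivK Y p))).map (ivOf Y)

-- Python's lexicographic order on pairs
def lexLe (p q : Int × Int) : Prop := p.1 < q.1 ∨ (p.1 = q.1 ∧ p.2 ≤ q.2)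

-- B's gap predicate, over membership only
def gapP (S : List (Int × Int)) : Prop :=
  ∃ q ∈ S, (∀ e ∈ S, ¬(e.1 ≤ q.1 - 1 ∧ q.1 - 1 ≤ e.2)) ∧ ∃ e ∈ S, e.2 < q.1

def maxEnd (cov : Int) (l : List (Int × Int)) : Int := l.foldl (fun c p => max c p.2) cov

lemma hor_intervals_eq (pairs : List ((Int × Int) × (Int × Int) × Int)) (Y : Int) :
    pairs.foldl (fun acc pair =>
      let S := pair.1
      let r := pair.2.2
      if S.2 + r ≥ Y ∨ S.2 - r ≤ Y then
        let i := r - hor_mdis S (S.1, Y)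
        if i < 0 then acc else acc ++ [(S.1 - i, S.1 + i)]
      else acc) [] = ivList pairs Y := by
  have h : (fun (acc : List (Int × Int)) (pair : (Int × Int) × (Int × Int) × Int) =>
      let S := pair.1
      let r := pair.2.2
      if S.2 + r ≥ Y ∨ S.2 - r ≤ Y then
        let i := r - hor_mdis S (S.1, Y)
        if i < 0 then acc else acc ++ [(S.1 - i, S.1 + i)]
      else acc) = (fun acc p => if decide (0 ≤ ivK Y p) then acc ++ [ivOf Y p] else acc) := by
    funext acc p
    have hm : hor_mdis p.1 (p.1.1, Y) = |p.1.2 - Y| := by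
      simp [hor_mdis]
    have ha := abs_nonneg (p.1.2 - Y)
    have ha2 := le_abs_self (p.1.2 - Y)
    have ha3 := neg_abs_le (p.1.2 - Y)
    simp only [hm, ivK, ivOf]
    split_ifs with h1 h2 h3 h3 <;>
      first
      | rfl
      | (exfalso; simp only [decide_eq_true_eq] at *; omega)
  rw [h, PySem.List.foldl_append_if]
  simp [ivList]

lemma hor_alt_intervals_eq (pairs : List ((Int × Int) × (Int × Int) × Int)) (Y : Int) :
    pairs.foldl (fun acc p =>
      let k := p.2.2 - |p.1.2 - Y|
      if 0 ≤ k then acc ++ [(p.1.1 - k, p.1.1 + k)] else acc) [] = ivList pairs Y := by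
  have h : (fun (acc : List (Int × Int)) (p : (Int × Int) × (Int × Int) × Int) =>
      let k := p.2.2 - |p.1.2 - Y|
      if 0 ≤ k then acc ++ [(p.1.1 - k, p.1.1 + k)] else acc)
      = (fun acc p => if decide (0 ≤ ivK Y p) then acc ++ [ivOf Y p] else acc) := by
    funext acc p
    simp [ivK, ivOf]
  rw [h, PySem.List.foldl_append_if]
  simp [ivList]

lemma mem_ivList_le {pairs : List ((Int × Int) × (Int × Int) × Int)} {Y : Int} {x : Int × Int}
    (hx : x ∈ ivList pairs Y) : x.1 ≤ x.2 := by
  simp only [ivList, List.mem_map, List.mem_filter, decide_eq_true_eq] at hx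
  obtain ⟨p, ⟨-, hk⟩, rfl⟩ := hx
  simp only [ivOf]
  omega

lemma pairwise_insertBy {α : Type} (before : α → α → Bool) (le : α → α → Prop)
    (htr : ∀ a b c, le a b → le b c → le a c)
    (hb : ∀ a b, (before a b = true → le a b) ∧ (before a b = false → le b a))
    (x : α) (l : List α) (h : l.Pairwise le) :
    (PySem.List.insertBy before x l).Pairwise le := by
  induction l with
  | nil => simp [PySem.List.insertBy]
  | cons y ys ih =>
    rw [List.pairwise_cons] at h
    by_cases hxy : before x y = true
    · rw [PySem.List.insertBy, if_pos hxy]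
      refine List.Pairwise.cons ?_ (List.Pairwise.cons h.1 h.2)
      intro z hz
      rcases List.mem_cons.mp hz with rfl | hz
      · exact (hb x z).1 hxy
      · exact htr x y z ((hb x y).1 hxy) (h.1 z hz)
    · rw [PySem.List.insertBy, if_neg hxy]
      refine List.Pairwise.cons ?_ (ih h.2)
      intro z hz
      rcases (PySem.List.mem_insertBy before x z ys).mp hz with rfl | hz
      · exact (hb _ _).2 (Bool.eq_false_iff.mpr hxy)
      · exact h.1 z hz

lemma sorted2_pairwise_lex (xs : List (Int × Int)) :
    (PySem.List.sorted2 xs (fun p => p.1) (fun p => p.2)).Pairwise lexLe := by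
  show (List.foldl _ [] xs).Pairwise lexLe
  have key : ∀ (l : List (Int × Int)) (acc : List (Int × Int)), acc.Pairwise lexLe →
      (l.foldl (fun acc x => PySem.List.insertBy
        (fun a b => decide (a.1 < b.1) || (!decide (b.1 < a.1) && decide (a.2 < b.2))) x acc) acc).Pairwise lexLe := by
    intro l
    induction l with
    | nil => intro acc h; simpa using h
    | cons y ys ih =>
      intro acc h
      refine ih _ (pairwise_insertBy _ lexLe ?_ ?_ y acc h)
      · intro a b c hab hbc
        simp only [lexLe] at *
        omega
      · intro a b
        constructor <;> intro hab <;>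
          simp only [Bool.or_eq_true, Bool.and_eq_true, Bool.not_eq_true', decide_eq_true_eq,
            decide_eq_false_iff_not, Bool.or_eq_false_iff, Bool.and_eq_false_iff,
            Bool.not_eq_false'] at hab <;> simp only [lexLe] <;> omega
  exact key xs [] List.Pairwise.nil

lemma horLoop_cons (cov a b : Int) (t : List (Int × Int)) :
    horLoop cov ((a, b) :: t) = if a - 1 > cov then true else horLoop (max cov b) t := by
  show (if a - 1 > cov then true else if b > cov then horLoop b t else horLoop cov t) = _
  by_cases h1 : a - 1 > cov
  · rw [if_pos h1, if_pos h1]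
  · rw [if_neg h1, if_neg h1]
    by_cases h2 : b > cov
    · rw [if_pos h2, max_eq_right (le_of_lt h2)]
    · rw [if_neg h2, max_eq_left (by omega)]

lemma maxEnd_le {c cov : Int} {l : List (Int × Int)} (h0 : cov ≤ c) (h : ∀ p ∈ l, p.2 ≤ c) :
    maxEnd cov l ≤ c := by
  induction l generalizing cov with
  | nil => exact h0
  | cons p t ih =>
    simp only [maxEnd, List.foldl_cons]
    exact ih (by have := h p (by simp); omega) (fun q hq => h q (by simp [hq]))

lemma le_maxEnd (cov : Int) (l : List (Int × Int)) :
    cov ≤ maxEnd cov l ∧ ∀ p ∈ l, p.2 ≤ maxEnd cov l := by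
  induction l generalizing cov with
  | nil => simp [maxEnd]
  | cons p t ih =>
    simp only [maxEnd, List.foldl_cons] at *
    obtain ⟨ih1, ih2⟩ := ih (cov := max cov p.2)
    refine ⟨by omega, ?_⟩
    intro q hq
    rcases List.mem_cons.mp hq with rfl | hq
    · omega
    · exact ih2 q hq

lemma horLoop_iff (t : List (Int × Int)) (cov : Int) :
    horLoop cov t = true ↔ ∃ i, ∃ h : i < t.length, (t[i]).1 - 1 > maxEnd cov (t.take i) := by
  induction t generalizing cov with
  | nil => simp [horLoop]
  | cons p t ih =>
    obtain ⟨a, b⟩ := p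
    rw [horLoop_cons]
    split_ifs with h
    · constructor
      · intro _
        exact ⟨0, by simp, by simpa [maxEnd] using h⟩
      · intro _; rfl
    · rw [ih]
      constructor
      · rintro ⟨i, hi, hgt⟩
        refine ⟨i + 1, by simpa using Nat.succ_lt_succ hi, ?_⟩
        simpa [maxEnd] using hgt
      · rintro ⟨i, hi, hgt⟩
        cases i with
        | zero =>
          exfalso
          simp only [List.take_zero, maxEnd, List.foldl_nil, List.getElem_cons_zero] at hgt
          omega
        | succ i =>
          refine ⟨i, by simpa using hi, ?_⟩
          simpa [maxEnd] using hgt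

lemma sweep_iff_gap (a0 b0 : Int) (t : List (Int × Int))
    (hab : ∀ p ∈ (a0, b0) :: t, p.1 ≤ p.2)
    (hsort : ((a0, b0) :: t).Pairwise lexLe) :
    horLoop b0 t = true ↔ gapP ((a0, b0) :: t) := by
  have hsort' : t.Pairwise lexLe := (List.pairwise_cons.mp hsort).2
  have hmono : ∀ i j (hi : i < t.length) (hj : j < t.length), i ≤ j → (t[i]).1 ≤ (t[j]).1 := by
    intro i j hi hj hij
    rcases Nat.eq_or_lt_of_le hij with rfl | hlt
    · exact le_refl _
    · have hlex := List.pairwise_iff_getElem.mp hsort' i j hi hj hlt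
      simp only [lexLe] at hlex
      omega
  have hhead : ∀ q ∈ t, a0 ≤ q.1 := by
    intro q hq
    have hlex := (List.pairwise_cons.mp hsort).1 q hq
    simp only [lexLe] at hlex
    omega
  rw [horLoop_iff]
  constructor
  · rintro ⟨i, hi, hgt⟩
    obtain ⟨hb0M, hmemM⟩ := le_maxEnd b0 (t.take i)
    refine ⟨t[i], List.mem_cons_of_mem _ (List.getElem_mem hi), ?_,
      ⟨(a0, b0), List.mem_cons_self, by simp only; omega⟩⟩
    intro e he
    rcases List.mem_cons.mp he with rfl | he
    · simp only
      omega
    · obtain ⟨j, hj, rfl⟩ := List.mem_iff_getElem.mp he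
      by_cases hji : j < i
      · have hjM : (t[j]).2 ≤ maxEnd b0 (t.take i) := by
          apply hmemM
          have hjt : j < (t.take i).length := by simp; omega
          have : (t.take i)[j] = t[j] := List.getElem_take
          exact this ▸ List.getElem_mem hjt
        omega
      · have : (t[i]).1 ≤ (t[j]).1 := hmono i j hi hj (le_of_not_gt hji)
        omega
  · rintro ⟨q, hq, hunc, e0, he0, he0lt⟩
    have ha0a : a0 < q.1 := by
      rcases List.mem_cons.mp he0 with rfl | he0m
      · have := hab (a0, b0) List.mem_cons_self
        simp only at he0lt this
        omega
      · have h1 := hhead e0 he0m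
        have h2 := hab e0 (List.mem_cons_of_mem _ he0m)
        omega
    have hqt : q ∈ t := by
      rcases List.mem_cons.mp hq with rfl | h
      · simp only at ha0a
        omega
      · exact h
    obtain ⟨jq, hjq, hjqeq⟩ := List.mem_iff_getElem.mp hqt
    have hex : ∃ j, j < t.length ∧ q.1 ≤ (t.getD j (0, 0)).1 :=
      ⟨jq, hjq, by rw [List.getD_eq_getElem _ _ hjq, hjqeq]⟩
    obtain ⟨hi, hia⟩ := Nat.find_spec hex
    refine ⟨Nat.find hex, hi, ?_⟩
    have hub : maxEnd b0 (t.take (Nat.find hex)) ≤ q.1 - 2 := by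
      apply maxEnd_le
      · have hnc := hunc (a0, b0) List.mem_cons_self
        simp only [not_and] at hnc
        omega
      · intro p hp
        obtain ⟨j, hjlt, rfl⟩ := List.mem_iff_getElem.mp hp
        have hjfind : j < Nat.find hex := by
          have := hjlt
          simp only [List.length_take] at this
          omega
        have hjlen : j < t.length := by
          have := hjlt
          simp only [List.length_take] at this
          omega
        have hgetj : (t.take (Nat.find hex))[j] = t[j] := List.getElem_take
        have hja : (t[j]).1 < q.1 := by
          have hmin := Nat.find_min hex hjfind
          push Not at hmin
          have := hmin hjlen
          rw [List.getD_eq_getElem _ _ hjlen] at this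
          omega
        have hnc := hunc (t[j]) (List.mem_cons_of_mem _ (List.getElem_mem hjlen))
        simp only [not_and] at hnc
        rw [hgetj]
        omega
    have hfa : q.1 ≤ (t[Nat.find hex]).1 := by
      rw [← List.getD_eq_getElem _ _ hi]
      exact hia
    omega

lemma gapP_perm {l₁ l₂ : List (Int × Int)} (h : l₁.Perm l₂) : gapP l₁ ↔ gapP l₂ := by
  unfold gapP
  constructor <;> rintro ⟨q, hq, hu, e, he, hlt⟩
  · exact ⟨q, h.mem_iff.mp hq, fun e' he' => hu e' (h.mem_iff.mpr he'), e, h.mem_iff.mp he, hlt⟩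
  · exact ⟨q, h.mem_iff.mpr hq, fun e' he' => hu e' (h.mem_iff.mp he'), e, h.mem_iff.mpr he, hlt⟩

lemma hor_alt_iff (pairs : List ((Int × Int) × (Int × Int) × Int)) (Y : Int) :
    hor_alt pairs Y = true ↔ gapP (ivList pairs Y) := by
  unfold hor_alt
  rw [hor_alt_intervals_eq]
  simp only [gapP, List.any_eq_true, List.all_eq_true, Bool.and_eq_true, Bool.not_eq_true',
    Bool.and_eq_false_iff, decide_eq_true_eq, decide_eq_false_iff_not]
  constructor <;> rintro ⟨q, hq, hu, e, he, hlt⟩ <;>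
    exact ⟨q, hq, fun e' he' => by have := hu e' he'; tauto, e, he, hlt⟩

lemma pre_iff_ne_nil (pairs : List ((Int × Int) × (Int × Int) × Int)) (Y : Int) :
    Pre_hor pairs Y ↔ ivList pairs Y ≠ [] := by
  unfold Pre_hor ivList
  rw [Ne, List.map_eq_nil_iff, List.filter_eq_nil_iff]
  simp only [List.any_eq_true, decide_eq_true_eq, ivK, not_forall]
  constructor
  · rintro ⟨p, hp, h0⟩
    exact ⟨p, hp, by simpa using h0⟩
  · rintro ⟨p, hp, h0⟩
    exact ⟨p, hp, by simpa using h0⟩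

-- ===== VERDICT (by name: the statement is the Claim_ definition above) =====
theorem hor_spec : Claim_equal_hor := by
  intro pairs Y _ hpre
  unfold Spec_hor
  have hne : ivList pairs Y ≠ [] := (pre_iff_ne_nil pairs Y).mp hpre
  have hhor : hor pairs Y = (match PySem.List.sorted2 (ivList pairs Y) (fun p => p.1) (fun p => p.2) with
      | [] => false
      | (_, b0) :: t => horLoop b0 t) := by
    simp only [hor, hor_intervals_eq]
  have hperm : (PySem.List.sorted2 (ivList pairs Y) (fun p => p.1) (fun p => p.2)).Perm (ivList pairs Y) :=
    PySem.List.sorted2_perm _ _ _ _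
  have hsort := sorted2_pairwise_lex (ivList pairs Y)
  cases hsi : PySem.List.sorted2 (ivList pairs Y) (fun p => p.1) (fun p => p.2) with
  | nil =>
    exact absurd (hsi ▸ hperm).nil_eq.symm hne
  | cons hd tl =>
    obtain ⟨a0, b0⟩ := hd
    rw [hsi] at hhor hperm hsort
    rw [hhor]
    have hab : ∀ p ∈ (a0, b0) :: tl, p.1 ≤ p.2 := fun p hp => mem_ivList_le (hperm.mem_iff.mp hp)
    rw [Bool.eq_iff_iff, sweep_iff_gap a0 b0 tl hab hsort, hor_alt_iff]
    exact gapP_perm hperm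

@[simp] theorem hor_raises : Claim_raises_hor := by
  unfold Claim_raises_hor
  constructor
  · intro pairs Y _ hr hpre
    unfold Raises_hor at hr
    unfold Pre_hor at hpre
    simp only [List.any_eq_true, List.all_eq_true, decide_eq_true_eq] at hr hpre
    obtain ⟨p, hp, h0⟩ := hpre
    have := hr p hp
    omega
  · exact ⟨by decide, by decide, by decide⟩
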